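-- pv_equiv track=rewrite | github.com/Skimatoshi/Code-problems | Codewars/Kyu 7/Square Digits - June 12, 2024.py | square_digits
-- ===== SOURCE A (Python) =====
-- def square_digits(num):
--
--     x = str(num)
--     q = list(x)
--
--     new_list = []
--     str_list = []
--
--
--     for i in q:
--         change_int = int(i)
--         new_list.append(change_int ** 2)
--
--     for i in new_list:
--         str_list.append(str(i))
--
--     final_str = "".join(str_list)
--
--     return int(final_str)
-- ===== SOURCE B (Python) =====
-- def square_digits(num):
--     parts = []
--     n = num
--     while n > 9:
--         n, d = divmod(n, 10)
--         parts.append(str(d * d))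
--     parts.append(str(n * n))
--     return int("".join(reversed(parts)))
-- ===== Notes on version B (the rewrite author's own statement) =====
-- stated objective: alternative
-- what changed: B never looks at str(num): it extracts digits arithmetically with divmod in a single loop, builds the squared-digit chunks least-significant-first, and reverses once at the end, instead of A's two staged passes over list(str(num)) with per-character int() and ** 2.
import Mathlib
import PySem

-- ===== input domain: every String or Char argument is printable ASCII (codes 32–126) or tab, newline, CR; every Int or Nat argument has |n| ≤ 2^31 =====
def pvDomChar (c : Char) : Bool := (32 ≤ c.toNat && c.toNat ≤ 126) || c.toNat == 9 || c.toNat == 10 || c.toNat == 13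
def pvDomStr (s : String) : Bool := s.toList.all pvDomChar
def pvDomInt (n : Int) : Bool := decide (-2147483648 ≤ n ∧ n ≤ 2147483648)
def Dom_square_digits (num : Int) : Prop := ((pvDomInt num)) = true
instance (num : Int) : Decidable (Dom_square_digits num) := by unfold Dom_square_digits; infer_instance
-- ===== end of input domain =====

-- B extracts digits with divmod arithmetic (no str(num)/per-char int()), building chunks least-significant-first and reversing once; return-value equivalence on num >= 0.


-- ===== PORT A =====
def square_digits (num : Int) : Int :=
  let x := PySem.Int.toStr num
  let q := x.toList
  -- for i in q: new_list.append(int(i) ** 2)   (int(i) raises outside Pre_; getD 0 is the totality guard)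
  let new_list := q.foldl (fun acc i => acc ++ [((PySem.Int.ofStr? (String.mk [i])).getD 0) ^ 2]) []
  -- for i in new_list: str_list.append(str(i))
  let str_list := new_list.foldl (fun acc i => acc ++ [PySem.Int.toStr i]) []
  let final_str := PySem.Str.join "" str_list
  (PySem.Int.ofStr? final_str).getD 0

-- ===== PORT B =====
-- while n > 9: n, d = divmod(n, 10); parts.append(str(d*d))
def sqLoop (n : Int) (parts : List String) : List String :=
  if _h : n > 9 then
    sqLoop (PySem.Int.floordiv n 10)
      (parts ++ [PySem.Int.toStr (PySem.Int.mod n 10 * PySem.Int.mod n 10)])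
  else
    -- parts.append(str(n * n))
    parts ++ [PySem.Int.toStr (n * n)]
termination_by n.toNat
decreasing_by
  have h10 : PySem.Int.floordiv n 10 = n / 10 := by
    simp [PySem.Int.floordiv, Int.fdiv_eq_ediv]
  rw [h10]; omega

def square_digits_alt (num : Int) : Int :=
  let parts := sqLoop num []
  -- int("".join(reversed(parts)))
  (PySem.Int.ofStr? (PySem.Str.join "" parts.reverse)).getD 0

-- ===== PRECONDITION & SPEC =====
-- Pre_ excludes exactly the negative inputs: there str(num) starts with '-', so A's int(i) on that character raises ValueError.
def Pre_square_digits (num : Int) : Prop := 0 ≤ num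
instance (num : Int) : Decidable (Pre_square_digits num) := by unfold Pre_square_digits; infer_instance
def pvWitness_square_digits : Int := (9119)
def Spec_square_digits (num : Int) (out : Int) : Prop := out = square_digits_alt num
instance (num : Int) (out : Int) : Decidable (Spec_square_digits num out) := by unfold Spec_square_digits; infer_instance

-- ===== CLAIM (what is proved, stated in full; the proofs are below) =====
def Claim_equal_square_digits : Prop := ∀ (num : Int), Dom_square_digits num → Pre_square_digits num → Spec_square_digits num (square_digits num)

-- ===== LEMMAS AND PROOFS =====

-- digits of n, least significant first (proof-side spine shared by both directions)
def dLSF (n : Nat) : List Nat :=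
  if h : n ≤ 9 then [n] else n % 10 :: dLSF (n / 10)
decreasing_by omega

theorem dLSF_lt (n : Nat) : ∀ d ∈ dLSF n, d < 10 := by
  induction n using Nat.strong_induction_on with
  | _ n ih =>
    intro d hd
    rw [dLSF] at hd
    split at hd
    next h => simp at hd; omega
    next h =>
      rcases List.mem_cons.mp hd with h1 | h1
      · omega
      · exact ih (n / 10) (by omega) d h1

-- the append-accumulator loops of A are maps
theorem foldl_append_map {α β : Type} (f : α → β) :
    ∀ (xs : List α) (acc : List β),
      xs.foldl (fun acc i => acc ++ [f i]) acc = acc ++ xs.map f := by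
  intro xs
  induction xs with
  | nil => simp
  | cons x xs ih => intro acc; simp [List.foldl_cons, ih]

-- Nat.toDigitsCore at base 10, with enough fuel, is the reversed LSF digit list
theorem toDigitsCore_eq_dLSF :
    ∀ (f n : Nat) (l : List Char), n < 10 ^ f →
      Nat.toDigitsCore 10 (f + 1) n l = (List.map Nat.digitChar (dLSF n)).reverse ++ l := by
  intro f
  induction f with
  | zero =>
    intro n l h
    have hn : n = 0 := by omega
    subst hn; simp [Nat.toDigitsCore, dLSF]
  | succ f ih =>
    intro n l h
    by_cases h9 : n ≤ 9
    · have : n / 10 = 0 := by omega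
      simp [Nat.toDigitsCore, this, dLSF, h9, Nat.mod_eq_of_lt (by omega : n < 10)]
    · have hne : ¬ n / 10 = 0 := by omega
      have hstep : Nat.toDigitsCore 10 (f + 1 + 1) n l
          = Nat.toDigitsCore 10 (f + 1) (n / 10) (Nat.digitChar (n % 10) :: l) := by
        conv_lhs => rw [Nat.toDigitsCore]
        simp [hne]
      rw [hstep, ih (n / 10) _ (by
        have : 10 ^ (f + 1) = 10 ^ f * 10 := by ring
        omega)]
      conv_rhs => rw [dLSF, dif_neg h9]
      simp

theorem toDigits_eq_dLSF (n : Nat) :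
    Nat.toDigits 10 n = (List.map Nat.digitChar (dLSF n)).reverse := by
  have h : n < 10 ^ n := by
    calc n < 2 ^ n := Nat.lt_two_pow_self
    _ ≤ 10 ^ n := Nat.pow_le_pow_left (by omega) n
  simpa using toDigitsCore_eq_dLSF n n [] h

theorem toChars_nonneg (num : Int) (h : 0 ≤ num) :
    PySem.Int.toChars num = Nat.toDigits 10 num.toNat := by
  unfold PySem.Int.toChars
  rw [if_neg (by omega)]

-- per-digit agreement: A's str(int(c) ** 2) on the digit character of d equals str(d * d)
theorem per_digit (d : Nat) (h : d < 10) :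
    PySem.Int.toStr (((PySem.Int.ofStr? (String.mk [Nat.digitChar d])).getD 0) ^ 2)
      = PySem.Int.toStr ((d : Int) * (d : Int)) := by
  interval_cases d <;> decide

-- B's loop produces exactly the squared-digit chunk strings, least significant first
theorem sqLoop_eq_aux : ∀ (m : Nat) (n : Int), 0 ≤ n → n.toNat = m → ∀ (acc : List String),
    sqLoop n acc = acc ++ (dLSF n.toNat).map (fun d : Nat => PySem.Int.toStr ((d : Int) * (d : Int))) := by
  intro m
  induction m using Nat.strong_induction_on with
  | _ m ih =>
    intro n hn hm acc
    by_cases h9 : n > 9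
    · rw [sqLoop, dif_pos h9]
      have hfd : PySem.Int.floordiv n 10 = n / 10 := by
        simp [PySem.Int.floordiv, Int.fdiv_eq_ediv]
      have hmd : PySem.Int.mod n 10 = n % 10 := by
        simp [PySem.Int.mod, Int.fmod_eq_emod]
      rw [hfd, hmd, ih (n / 10).toNat (by omega) (n / 10) (by omega) rfl]
      have hsplit : dLSF n.toNat = n.toNat % 10 :: dLSF (n.toNat / 10) := by
        rw [dLSF]; rw [dif_neg (by omega)]
      have htn : (n / 10).toNat = n.toNat / 10 := by omega
      have hcast : n % 10 = ((n.toNat % 10 : Nat) : Int) := by omega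
      rw [htn, hsplit, hcast]
      simp
    · rw [sqLoop, dif_neg h9]
      rw [show dLSF n.toNat = [n.toNat] from by rw [dLSF]; rw [dif_pos (by omega)]]
      have hcast : ((n.toNat : Nat) : Int) = n := Int.toNat_of_nonneg hn
      simp [hcast]

theorem sqLoop_eq (n : Int) (hn : 0 ≤ n) (acc : List String) :
    sqLoop n acc = acc ++ (dLSF n.toNat).map (fun d : Nat => PySem.Int.toStr ((d : Int) * (d : Int))) :=
  sqLoop_eq_aux n.toNat n hn rfl acc

-- ===== VERDICT (by name: the statement is the Claim_ definition above) =====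
set_option maxHeartbeats 1000000 in
theorem square_digits_spec : Claim_equal_square_digits := by
  intro num _ hpre
  unfold Spec_square_digits square_digits square_digits_alt
  rw [sqLoop_eq num hpre []]
  simp only [foldl_append_map, List.nil_append, List.map_map]
  rw [PySem.Int.toList_toStr, toChars_nonneg num hpre, toDigits_eq_dLSF]
  rw [List.map_reverse, List.map_map]
  congr 2
  refine congrArg (fun l : List String => PySem.Str.join "" l.reverse) ?_
  apply List.map_congr_left
  intro d hd
  simp only [Function.comp]
  exact per_digit d (dLSF_lt _ d hd)
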